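-- pv_equiv track=rewrite | github.com/kingguuu8-svg/verilog-skill | stages/verilog-waveform-observation/scripts/waveform_support.py | normalize_signal_tokens
-- ===== SOURCE A (Python) =====
-- def normalize_signal_tokens(raw_tokens: list[str]) -> list[str]:
--     normalized: list[str] = []
--     for token in raw_tokens:
--         for part in token.split(","):
--             stripped = part.strip()
--             if stripped:
--                 normalized.append(stripped)
--     return normalized
-- ===== SOURCE B (Python) =====
-- def normalize_signal_tokens(raw_tokens: list[str]) -> list[str]:
--     result: list[str] = []
--     for token in raw_tokens:
--         word: list[str] = []      # characters of the current (already-stripped) word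
--         pending: list[str] = []   # whitespace seen since the word, kept only if more word follows
--         for ch in token:
--             if ch == ",":
--                 if word:
--                     result.append("".join(word))
--                     word = []
--                 pending = []
--             elif ch.isspace():
--                 if word:
--                     pending.append(ch)
--             else:
--                 word += pending
--                 word.append(ch)
--                 pending = []
--         if word:
--             result.append("".join(word))
--     return result
-- ===== Notes on version B (the rewrite author's own statement) =====
-- stated objective: alternative
-- what changed: B uses no split or strip at all: a single character-level state machine with a word buffer and a pending-whitespace buffer builds each stripped word directly, flushing at commas and token ends.
import Mathlib
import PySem

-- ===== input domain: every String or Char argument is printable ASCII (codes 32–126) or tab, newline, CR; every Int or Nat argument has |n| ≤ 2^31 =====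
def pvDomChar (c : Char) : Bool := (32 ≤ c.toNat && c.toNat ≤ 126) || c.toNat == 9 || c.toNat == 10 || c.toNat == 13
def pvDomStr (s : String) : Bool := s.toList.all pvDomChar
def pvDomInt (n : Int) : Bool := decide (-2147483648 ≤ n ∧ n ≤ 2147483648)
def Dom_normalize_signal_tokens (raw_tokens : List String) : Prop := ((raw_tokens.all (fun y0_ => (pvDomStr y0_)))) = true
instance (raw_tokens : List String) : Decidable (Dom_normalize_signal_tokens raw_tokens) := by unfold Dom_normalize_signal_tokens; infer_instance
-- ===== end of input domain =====

-- B replaces A's split/strip library calls with a single character-level state machine (word buffer + pending-whitespace buffer) that builds each stripped word directly; alternative algorithm, same cost.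


-- ===== PORT A =====
def normalize_signal_tokens (raw_tokens : List String) : List String :=
  raw_tokens.foldl (fun normalized token =>
    ((PySem.Chars.splitOn token.toList ",".toList).map String.ofList).foldl
      (fun normalized part =>
        let stripped := PySem.Str.strip part
        if stripped ≠ "" then normalized ++ [stripped] else normalized)
      normalized) []

-- ===== PORT B =====
-- the loop body of B's inner per-character loop
def nstStep (st : List String × List Char × List Char) (ch : Char) :
    List String × List Char × List Char :=
  if ch = ',' then
    ((if st.2.1 ≠ [] then st.1 ++ [String.ofList st.2.1] else st.1), [], [])
  else if PySem.Chars.isspace ch then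
    (st.1, st.2.1, if st.2.1 ≠ [] then st.2.2 ++ [ch] else st.2.2)
  else
    (st.1, st.2.1 ++ st.2.2 ++ [ch], [])

-- end-of-token flush ('if word: result.append("".join(word))')
def nstFlush (st : List String × List Char × List Char) : List String :=
  if st.2.1 ≠ [] then st.1 ++ [String.ofList st.2.1] else st.1

-- processing of one token (B's outer loop body)
def nstScanTok (result : List String) (cs : List Char) : List String :=
  nstFlush (cs.foldl nstStep (result, [], []))

def normalize_signal_tokens_alt (raw_tokens : List String) : List String :=
  raw_tokens.foldl (fun result token => nstScanTok result token.toList) []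

-- ===== PRECONDITION & SPEC =====
def Spec_normalize_signal_tokens (raw_tokens : List String) (out : List String) : Prop := out = normalize_signal_tokens_alt raw_tokens
instance (raw_tokens : List String) (out : List String) : Decidable (Spec_normalize_signal_tokens raw_tokens out) := by unfold Spec_normalize_signal_tokens; infer_instance

-- ===== CLAIM (what is proved, stated in full; the proofs are below) =====
def Claim_equal_normalize_signal_tokens : Prop := ∀ (raw_tokens : List String), Dom_normalize_signal_tokens raw_tokens → Spec_normalize_signal_tokens raw_tokens (normalize_signal_tokens raw_tokens)

-- ===== LEMMAS AND PROOFS =====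

-- structural model of splitting a character list on ','
def pvSp : List Char → List (List Char)
  | [] => [[]]
  | c :: rest => if c = ',' then [] :: pvSp rest else (pvSp rest).modifyHead (c :: ·)

-- head segment / tail segments of pvSp
def pvSpH : List Char → List Char
  | [] => []
  | c :: rest => if c = ',' then [] else c :: pvSpH rest

def pvSpT : List Char → List (List Char)
  | [] => []
  | c :: rest => if c = ',' then pvSp rest else pvSpT rest

theorem pvSp_eq (cs : List Char) : pvSp cs = pvSpH cs :: pvSpT cs := by
  induction cs with
  | nil => simp [pvSp, pvSpH, pvSpT]
  | cons c rest ih =>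
    by_cases hc : c = ','
    · simp [pvSp, pvSpH, pvSpT, hc]
    · simp [pvSp, pvSpH, pvSpT, hc, ih, List.modifyHead]

theorem modifyHead_modifyHead {α : Type} (f g : α → α) (xs : List α) :
    (xs.modifyHead g).modifyHead f = xs.modifyHead (fun x => f (g x)) := by
  cases xs <;> simp [List.modifyHead]

theorem pvGo_eq (l : List Char) : ∀ (fuel : Nat) (cur : List Char) (acc : List (List Char)),
    l.length < fuel →
    PySem.Chars.splitOn.go [','] fuel l cur acc
      = acc.reverse ++ (pvSp l).modifyHead (cur.reverse ++ ·) := by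
  induction l with
  | nil =>
    intro fuel cur acc h
    cases fuel with
    | zero => omega
    | succ f => simp [PySem.Chars.splitOn.go, pvSp, List.modifyHead]
  | cons c rest ih =>
    intro fuel cur acc h
    cases fuel with
    | zero => simp at h
    | succ f =>
      by_cases hc : c = ','
      · subst hc
        have hpre : [','].isPrefixOf (',' :: rest) = true := by simp [List.isPrefixOf]
        rw [PySem.Chars.splitOn.go, if_pos hpre]
        simp only [List.length_cons] at h
        simp only [List.length_singleton, List.drop_succ_cons, List.drop_zero]
        rw [ih f [] (cur.reverse :: acc) (by omega)]
        have : (pvSp rest).modifyHead (List.reverse [] ++ ·) = pvSp rest := by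
          cases pvSp rest <;> simp [List.modifyHead]
        rw [this]
        simp [pvSp, List.modifyHead]
      · have hpre : [','].isPrefixOf (c :: rest) = false := by
          simp [List.isPrefixOf]; exact fun hh => absurd hh.symm hc
        rw [PySem.Chars.splitOn.go, if_neg (by simp [hpre])]
        simp only [List.length_cons] at h
        rw [ih f (c :: cur) acc (by omega)]
        simp only [pvSp, if_neg hc, modifyHead_modifyHead]
        have hfun : (fun x => (c :: cur).reverse ++ x) = (fun x : List Char => cur.reverse ++ c :: x) := by
          funext x; simp
        rw [hfun]

theorem pvSplitOn_comma (cs : List Char) : PySem.Chars.splitOn cs [','] = pvSp cs := by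
  rw [PySem.Chars.splitOn, pvGo_eq cs (cs.length + 1) [] [] (by omega)]
  cases pvSp cs <;> simp [List.modifyHead]

def pvKeep (part : String) : Option String :=
  let stripped := PySem.Str.strip part
  if stripped ≠ "" then some stripped else none

theorem pvInner (parts : List String) : ∀ acc : List String,
    parts.foldl (fun normalized part =>
      let stripped := PySem.Str.strip part
      if stripped ≠ "" then normalized ++ [stripped] else normalized) acc
    = acc ++ parts.filterMap pvKeep := by
  induction parts with
  | nil => intro acc; simp
  | cons p rest ih =>
    intro acc
    simp only [List.foldl_cons, List.filterMap_cons, ih, pvKeep]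
    split_ifs <;> simp

theorem pvA_eq (ts : List String) :
    normalize_signal_tokens ts
    = ts.flatMap (fun t => ((PySem.Chars.splitOn t.toList ",".toList).map String.ofList).filterMap pvKeep) := by
  have h : ∀ acc : List String,
      ts.foldl (fun normalized token =>
        ((PySem.Chars.splitOn token.toList ",".toList).map String.ofList).foldl
          (fun normalized part =>
            let stripped := PySem.Str.strip part
            if stripped ≠ "" then normalized ++ [stripped] else normalized)
          normalized) acc
      = acc ++ ts.flatMap (fun t => ((PySem.Chars.splitOn t.toList ",".toList).map String.ofList).filterMap pvKeep) := by
    induction ts with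
    | nil => intro acc; simp
    | cons t rest ih =>
      intro acc
      rw [List.foldl_cons, pvInner, ih]
      simp
  unfold normalize_signal_tokens
  rw [h []]
  exact List.nil_append _

-- invariant of B's scanner state: pending is all whitespace, empty while the word is,
-- and the word neither starts nor ends in whitespace
def pvInv (w pd : List Char) : Prop :=
  pd.all PySem.Chars.isspace = true ∧ (w = [] → pd = []) ∧
  (∀ c, w.head? = some c → PySem.Chars.isspace c = false) ∧
  (∀ c, w.getLast? = some c → PySem.Chars.isspace c = false)

theorem pvStrip_inv (w pd : List Char) (h : pvInv w pd) :
    PySem.Chars.strip (w ++ pd) = w := by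
  obtain ⟨hpd, hwe, hh, hl⟩ := h
  cases w with
  | nil =>
    rw [hwe rfl]
    rfl
  | cons c t =>
    have hc : PySem.Chars.isspace c = false := hh c rfl
    unfold PySem.Chars.strip PySem.Chars.lstrip PySem.Chars.rstrip
    rw [List.cons_append, List.dropWhile_cons, hc]
    simp only [Bool.false_eq_true, if_false]
    rw [← List.cons_append, List.reverse_append]
    have hpdrev : List.dropWhile PySem.Chars.isspace pd.reverse = [] := by
      rw [List.dropWhile_eq_nil_iff]
      intro x hx
      exact (List.all_eq_true.mp hpd x (List.mem_reverse.mp hx))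
    rw [List.dropWhile_append, hpdrev]
    simp only [List.isEmpty_nil, if_true]
    cases hrev : (c :: t).reverse with
    | nil => simp at hrev
    | cons a r =>
      have ha : (c :: t).getLast? = some a := by
        rw [← List.head?_reverse, hrev]; rfl
      have haw : PySem.Chars.isspace a = false := hl a ha
      rw [List.dropWhile_cons, haw]
      simp only [Bool.false_eq_true, if_false]
      rw [← hrev, List.reverse_reverse]

theorem pvStrip_ws_cons (c : Char) (xs : List Char) (h : PySem.Chars.isspace c = true) :
    PySem.Chars.strip (c :: xs) = PySem.Chars.strip xs := by
  unfold PySem.Chars.strip PySem.Chars.lstrip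
  rw [List.dropWhile_cons, h]
  simp

theorem pvKeep_ofList (p : List Char) :
    pvKeep (String.ofList p)
      = if PySem.Chars.strip p ≠ [] then some (String.ofList (PySem.Chars.strip p)) else none := by
  have he : ∀ q : List Char, (String.ofList q = "") ↔ q = [] := by
    intro q
    constructor
    · intro h; simpa using congrArg String.toList h
    · intro h; simp [h]
  unfold pvKeep PySem.Str.strip
  simp only [String.toList_ofList]
  by_cases h : PySem.Chars.strip p = []
  · simp [h]
  · rw [if_pos (by simpa [he] using h), if_pos h]

theorem pvScan (cs : List Char) : ∀ (res : List String) (w pd : List Char), pvInv w pd →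
    nstFlush (cs.foldl nstStep (res, w, pd))
      = res ++ (pvKeep (String.ofList (w ++ pd ++ pvSpH cs))).toList
          ++ ((pvSpT cs).map String.ofList).filterMap pvKeep := by
  induction cs with
  | nil =>
    intro res w pd hinv
    simp only [List.foldl_nil, nstFlush, pvSpH, pvSpT, List.append_nil, pvKeep_ofList,
      pvStrip_inv w pd hinv]
    by_cases hw : w = [] <;> simp [hw]
  | cons c rest ih =>
    intro res w pd hinv
    have hinv0 : pvInv [] [] := by
      refine ⟨rfl, fun _ => rfl, ?_, ?_⟩ <;> intro x hx <;> simp at hx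
    rw [List.foldl_cons]
    by_cases hc : c = ','
    · subst hc
      have hstep : nstStep (res, w, pd) ',' =
          ((if w ≠ [] then res ++ [String.ofList w] else res), [], []) := by
        simp [nstStep]
      rw [hstep, ih _ [] [] hinv0]
      have hflush : pvKeep (String.ofList (w ++ pd)) =
          if w ≠ [] then some (String.ofList w) else none := by
        rw [pvKeep_ofList, pvStrip_inv w pd hinv]
      simp only [pvSpH, pvSpT, reduceIte, pvSp_eq, List.append_nil, List.nil_append,
        List.map_cons, List.filterMap_cons, List.filterMap_map]
      rw [hflush]
      cases hk : pvKeep (String.ofList (pvSpH rest)) <;>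
        by_cases hw : w = [] <;> simp [hw]
    · by_cases hs : PySem.Chars.isspace c
      · by_cases hw : w = []
        · subst hw
          have hpd : pd = [] := hinv.2.1 rfl
          subst hpd
          have hstep : nstStep (res, ([] : List Char), ([] : List Char)) c = (res, [], []) := by
            simp [nstStep, hc, hs]
          rw [hstep, ih res [] [] hinv0]
          simp only [pvSpH, pvSpT, if_neg hc, List.nil_append]
          rw [pvKeep_ofList, pvKeep_ofList, pvStrip_ws_cons c _ hs]
        · have hstep : nstStep (res, w, pd) c = (res, w, pd ++ [c]) := by
            simp [nstStep, hc, hs, hw]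
          rw [hstep]
          have hinv' : pvInv w (pd ++ [c]) := by
            obtain ⟨h1, h2, h3, h4⟩ := hinv
            refine ⟨?_, fun h => absurd h hw, h3, h4⟩
            simp [List.all_eq_true] at h1 ⊢
            exact ⟨h1, hs⟩
          rw [ih res w (pd ++ [c]) hinv']
          simp only [pvSpH, pvSpT, if_neg hc]
          have : w ++ (pd ++ [c]) ++ pvSpH rest = w ++ pd ++ (c :: pvSpH rest) := by
            simp
          rw [this]
      · have hstep : nstStep (res, w, pd) c = (res, w ++ pd ++ [c], []) := by
          simp [nstStep, hc, hs]
        rw [hstep]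
        have hinv' : pvInv (w ++ pd ++ [c]) [] := by
          obtain ⟨h1, h2, h3, h4⟩ := hinv
          refine ⟨rfl, fun h => by simp at h, ?_, ?_⟩
          · intro x hx
            cases w with
            | nil =>
              rw [h2 rfl] at hx
              simp at hx
              rw [← hx]
              simpa using hs
            | cons a t =>
              simp at hx
              rw [← hx]
              exact h3 a rfl
          · intro x hx
            rw [List.getLast?_concat] at hx
            simp at hx
            rw [← hx]
            simpa using hs
        rw [ih res (w ++ pd ++ [c]) [] hinv']
        simp only [pvSpH, pvSpT, if_neg hc]
        have : w ++ pd ++ [c] ++ [] ++ pvSpH rest = w ++ pd ++ (c :: pvSpH rest) := by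
          simp
        rw [this]

theorem pvScanTok_eq (res : List String) (cs : List Char) :
    nstScanTok res cs = res ++ ((pvSp cs).map String.ofList).filterMap pvKeep := by
  unfold nstScanTok
  rw [pvScan cs res [] [] ⟨rfl, fun _ => rfl, by intro x hx; simp at hx, by intro x hx; simp at hx⟩]
  rw [pvSp_eq]
  cases hk : pvKeep (String.ofList (pvSpH cs)) <;>
    simp [hk]

theorem pvB_eq (ts : List String) :
    normalize_signal_tokens_alt ts
    = ts.flatMap (fun t => ((pvSp t.toList).map String.ofList).filterMap pvKeep) := by
  have h : ∀ acc : List String,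
      ts.foldl (fun result token => nstScanTok result token.toList) acc
        = acc ++ ts.flatMap (fun t => ((pvSp t.toList).map String.ofList).filterMap pvKeep) := by
    induction ts with
    | nil => intro acc; simp
    | cons t rest ih =>
      intro acc
      rw [List.foldl_cons, pvScanTok_eq, ih]
      simp
  unfold normalize_signal_tokens_alt
  rw [h []]
  exact List.nil_append _

-- ===== VERDICT (by name: the statement is the Claim_ definition above) =====
theorem normalize_signal_tokens_spec : Claim_equal_normalize_signal_tokens := by
  unfold Claim_equal_normalize_signal_tokens
  intro ts _
  unfold Spec_normalize_signal_tokens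
  rw [pvA_eq, pvB_eq]
  have hc : ",".toList = [','] := by decide
  simp [hc, pvSplitOn_comma]
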